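-- pv_equiv track=rewrite | github.com/justinhuang666666/Approximate-Matrix-Vector-Multiplication | utils/generate_parameters.py | generate_pairs2
-- ===== SOURCE A (Python) =====
-- import math
--
-- def generate_pairs2(R):
--     # Define the possible values for Tc
--     Tc_values = [1, 2, 8, 16, 32, 64, 192]
--
--     # Initialize an empty list to store the valid pairs
--     valid_pairs = []
--
--     # Iterate over each possible value of Tc
--     for Tc in Tc_values:
--         # Calculate the maximum possible NZc based on V and Tc
--         max_NZc = R // Tc
--
--         # Iterate over possible values of NZc from 1 to max_NZc
--         for NZc in range(math.ceil(max_NZc/2), max_NZc + 1):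
--             if Tc == 1 and (NZc % 16 == 0):
--                 valid_pairs.append((Tc, NZc))
--             elif Tc == 2 and (NZc % 8 == 0):
--                 valid_pairs.append((Tc, NZc))
--             elif Tc == 4 and (NZc % 4 == 0):
--                 valid_pairs.append((Tc, NZc))
--             elif Tc == 8 and (NZc % 2 == 0):
--                 valid_pairs.append((Tc, NZc))
--             elif Tc in [10, 16, 32, 64]:
--                 valid_pairs.append((Tc, NZc))
--
--     # Return the list of valid pairs
--     return valid_pairs
-- ===== SOURCE B (Python) =====
-- def generate_pairs2(R):
--     # Each qualifying Tc maps to the divisor its NZc must be a multiple of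
--     # (Tc values whose branch can never fire, like 192, are simply absent).
--     valid_pairs = []
--     for Tc, d in [(1, 16), (2, 8), (8, 2), (16, 1), (32, 1), (64, 1)]:
--         max_NZc = R // Tc
--         lo = -(-max_NZc // 2)            # ceil(max_NZc / 2)
--         first = -(-lo // d) * d          # smallest multiple of d >= lo
--         valid_pairs.extend((Tc, NZc) for NZc in range(first, max_NZc + 1, d))
--     return valid_pairs
-- ===== Notes on version B (the rewrite author's own statement) =====
-- stated objective: faster
-- what changed: Replaces the scan-every-NZc-and-test if/elif chain with a (Tc, divisor) table and direct enumeration of the multiples of the divisor via a stepped range starting at the first multiple >= ceil(max_NZc/2).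
import Mathlib
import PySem

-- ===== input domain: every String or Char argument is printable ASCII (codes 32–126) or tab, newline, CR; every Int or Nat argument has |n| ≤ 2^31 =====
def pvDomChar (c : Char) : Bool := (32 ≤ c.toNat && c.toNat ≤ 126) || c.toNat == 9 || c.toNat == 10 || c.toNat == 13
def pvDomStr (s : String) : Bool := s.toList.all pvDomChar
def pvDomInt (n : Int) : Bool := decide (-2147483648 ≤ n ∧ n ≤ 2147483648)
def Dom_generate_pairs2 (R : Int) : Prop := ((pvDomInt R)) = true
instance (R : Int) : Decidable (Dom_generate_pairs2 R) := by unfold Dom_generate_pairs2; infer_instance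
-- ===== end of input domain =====

-- B replaces A's scan-all-then-filter inner loop and if/elif chain by a (Tc, divisor)
-- table and a stepped range that enumerates exactly the qualifying multiples (faster in a timing run).

-- ===== PORT A =====
-- math.ceil(max_NZc/2) is float ceiling; on |R| ≤ 2^31 the float quotient is exact,
-- so it is ported exactly as the integer ceiling -((-max_NZc) // 2).
def generate_pairs2 (R : Int) : List (Int × Int) :=
  ([1, 2, 8, 16, 32, 64, 192] : List Int).foldl (fun valid_pairs Tc =>
    let max_NZc := PySem.Int.floordiv R Tc
    (PySem.List.pyRange (-(PySem.Int.floordiv (-max_NZc) 2)) (max_NZc + 1) 1).foldl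
      (fun vp NZc =>
        if Tc == 1 && PySem.Int.mod NZc 16 == 0 then vp ++ [(Tc, NZc)]
        else if Tc == 2 && PySem.Int.mod NZc 8 == 0 then vp ++ [(Tc, NZc)]
        else if Tc == 4 && PySem.Int.mod NZc 4 == 0 then vp ++ [(Tc, NZc)]
        else if Tc == 8 && PySem.Int.mod NZc 2 == 0 then vp ++ [(Tc, NZc)]
        else if ([10, 16, 32, 64] : List Int).contains Tc then vp ++ [(Tc, NZc)]
        else vp) valid_pairs) []

-- ===== PORT B =====
def generate_pairs2_alt (R : Int) : List (Int × Int) :=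
  ([(1, 16), (2, 8), (8, 2), (16, 1), (32, 1), (64, 1)] : List (Int × Int)).foldl
    (fun valid_pairs Td =>
      let Tc := Td.1
      let d := Td.2
      let max_NZc := PySem.Int.floordiv R Tc
      let lo := -(PySem.Int.floordiv (-max_NZc) 2)
      let first := -(PySem.Int.floordiv (-lo) d) * d
      valid_pairs ++ (PySem.List.pyRange first (max_NZc + 1) d).map (fun NZc => (Tc, NZc))) []

-- ===== PRECONDITION & SPEC =====
def Spec_generate_pairs2 (R : Int) (out : List (Int × Int)) : Prop := out = generate_pairs2_alt R
instance (R : Int) (out : List (Int × Int)) : Decidable (Spec_generate_pairs2 R out) := by unfold Spec_generate_pairs2; infer_instance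

-- ===== CLAIM (what is proved, stated in full; the proofs are below) =====
def Claim_equal_generate_pairs2 : Prop := ∀ (R : Int), Dom_generate_pairs2 R → Spec_generate_pairs2 R (generate_pairs2 R)

-- ===== LEMMAS AND PROOFS =====

-- -((-x) // d) * d is the unique multiple m of d with x ≤ m < x + d
lemma ceilMul_eq (d x m : Int) (hd : 0 < d) (hm : d ∣ m) (h1 : x ≤ m) (h2 : m - d < x) :
    -(PySem.Int.floordiv (-x) d) * d = m := by
  obtain ⟨q, rfl⟩ := hm
  have hq : -(PySem.Int.floordiv (-x) d) = q := by
    rw [PySem.Int.neg_floordiv_neg_eq_iff_of_pos hd]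
    constructor <;> nlinarith
  rw [hq]; ring

lemma ceilMul_facts (d x : Int) (hd : 0 < d) :
    d ∣ (-(PySem.Int.floordiv (-x) d) * d) ∧ x ≤ -(PySem.Int.floordiv (-x) d) * d ∧
      -(PySem.Int.floordiv (-x) d) * d - d < x := by
  have h := (PySem.Int.neg_floordiv_neg_eq_iff_of_pos (a := x) (q := -(PySem.Int.floordiv (-x) d)) hd).mp rfl
  refine ⟨Dvd.intro_left _ rfl, by nlinarith [h.1, h.2], by nlinarith [h.1, h.2]⟩

lemma pyRange_pos_eq_nil (a b d : Int) (hd : 0 < d) (h : b ≤ a) :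
    PySem.List.pyRange a b d = [] := by
  rw [PySem.List.pyRange_of_pos a b hd, if_neg (by omega)]
  simp

lemma pyRange_pos_cons (a b d : Int) (hd : 0 < d) (h : a < b) :
    PySem.List.pyRange a b d = a :: PySem.List.pyRange (a + d) b d := by
  rw [PySem.List.pyRange_of_pos a b hd, PySem.List.pyRange_of_pos (a + d) b hd, if_pos h]
  have hcount : ((b - a + d - 1) / d).toNat =
      (if a + d < b then ((b - (a + d) + d - 1) / d).toNat else 0) + 1 := by
    split_ifs with h2
    · have : (b - a + d - 1) / d = (b - (a + d) + d - 1) / d + 1 := by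
        rw [show b - a + d - 1 = (b - (a + d) + d - 1) + 1 * d by ring]
        exact Int.add_mul_ediv_right _ 1 (by omega)
      rw [this]
      have : 0 ≤ (b - (a + d) + d - 1) / d := Int.ediv_nonneg (by omega) (by omega)
      omega
    · have h1 : d ≤ b - a + d - 1 := by omega
      have h2' : b - a + d - 1 < 2 * d := by omega
      have e1 : (1:Int) ≤ (b - a + d - 1) / d := by
        rw [Int.le_ediv_iff_mul_le (by omega)]; omega
      have e2 : (b - a + d - 1) / d < 2 := by
        rw [Int.ediv_lt_iff_lt_mul (by omega)]; omega
      omega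
  rw [hcount, List.range_succ_eq_map]
  simp only [List.map_cons, List.map_map, Nat.cast_zero, mul_zero, add_zero]
  congr 1
  apply List.map_congr_left
  intro k _
  simp [Function.comp]
  ring

-- multiples of d in [lo, hi) picked out of a unit-step range = the stepped range from the first multiple ≥ lo
lemma filter_mod_pyRange (d : Int) (hd : 0 < d) :
    ∀ (n : Nat) (lo hi : Int), hi - lo ≤ (n : Int) →
      (PySem.List.pyRange lo hi 1).filter (fun x => PySem.Int.mod x d == 0)
        = PySem.List.pyRange (-(PySem.Int.floordiv (-lo) d) * d) hi d := by
  intro n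
  induction n with
  | zero =>
    intro lo hi h
    obtain ⟨hdvd, hle, hlt⟩ := ceilMul_facts d lo hd
    rw [PySem.List.pyRange_one_eq_nil (by omega), pyRange_pos_eq_nil _ _ _ hd (by omega)]
    simp
  | succ n ih =>
    intro lo hi h
    by_cases hlh : hi ≤ lo
    · obtain ⟨hdvd, hle, hlt⟩ := ceilMul_facts d lo hd
      rw [PySem.List.pyRange_one_eq_nil hlh, pyRange_pos_eq_nil _ _ _ hd (by omega)]
      simp
    · replace hlh : lo < hi := by omega
      rw [PySem.List.pyRange_one_cons hlh]
      by_cases hdlo : d ∣ lo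
      · have hc0 : -(PySem.Int.floordiv (-lo) d) * d = lo :=
          ceilMul_eq d lo lo hd hdlo le_rfl (by omega)
        have hc1 : -(PySem.Int.floordiv (-(lo + 1)) d) * d = lo + d :=
          ceilMul_eq d (lo + 1) (lo + d) hd (dvd_add hdlo dvd_rfl) (by omega) (by omega)
        rw [List.filter_cons_of_pos (by simp [PySem.Int.mod_eq_zero_iff_dvd]; exact hdlo)]
        rw [ih (lo + 1) hi (by omega), hc1, hc0, pyRange_pos_cons lo hi d hd hlh]
      · obtain ⟨hdvd, hle, hlt⟩ := ceilMul_facts d lo hd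
        have hne : -(PySem.Int.floordiv (-lo) d) * d ≠ lo := fun e => hdlo (e ▸ hdvd)
        have hc1 : -(PySem.Int.floordiv (-(lo + 1)) d) * d = -(PySem.Int.floordiv (-lo) d) * d :=
          ceilMul_eq d (lo + 1) _ hd hdvd (by omega) (by omega)
        rw [List.filter_cons_of_neg (by simp [PySem.Int.mod_eq_zero_iff_dvd]; exact hdlo)]
        rw [ih (lo + 1) hi (by omega), hc1]

-- one segment of A (inner loop with filter predicate "multiple of d") = one segment of B
lemma seg_eq (R Tc d : Int) (hd : 0 < d) :
    (List.filter (fun x => PySem.Int.mod x d == 0)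
        (PySem.List.pyRange (-(PySem.Int.floordiv (-(PySem.Int.floordiv R Tc)) 2))
          (PySem.Int.floordiv R Tc + 1) 1)).map (fun NZc => (Tc, NZc))
      = (PySem.List.pyRange
          (-(PySem.Int.floordiv (-(-(PySem.Int.floordiv (-(PySem.Int.floordiv R Tc)) 2))) d) * d)
          (PySem.Int.floordiv R Tc + 1) d).map (fun NZc => (Tc, NZc)) := by
  set lo := -(PySem.Int.floordiv (-(PySem.Int.floordiv R Tc)) 2)
  set hi := PySem.Int.floordiv R Tc + 1
  have hb : hi - lo ≤ ((hi - lo).toNat : Int) := Int.self_le_toNat _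
  rw [filter_mod_pyRange d hd (hi - lo).toNat lo hi hb]

-- for divisor 1 the first multiple ≥ lo is lo itself
lemma first_one (lo : Int) : -(PySem.Int.floordiv (-lo) 1) * 1 = lo :=
  ceilMul_eq 1 lo lo one_pos (one_dvd _) le_rfl (by omega)

-- ===== VERDICT (by name: the statement is the Claim_ definition above) =====
theorem generate_pairs2_spec : Claim_equal_generate_pairs2 := by
  intro R _
  unfold Spec_generate_pairs2 generate_pairs2 generate_pairs2_alt
  simp only [List.foldl_cons, List.foldl_nil, List.contains_cons, List.contains_nil,
    Int.reduceBEq, Bool.or_false, Bool.or_true,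
    Bool.false_and, Bool.true_and, Bool.false_eq_true,
    if_true, if_false, PySem.List.foldl_append_if,
    PySem.List.foldl_append_singleton_eq_map, List.foldl_fixed, List.nil_append]
  simp only [first_one]
  rw [seg_eq R 1 16 (by norm_num), seg_eq R 2 8 (by norm_num), seg_eq R 8 2 (by norm_num)]
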